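-- pv_equiv track=rewrite | github.com/Andrew-Koulogeorge/CS76-AI | Maze World/test_sensorless.py | card_and_closeness_heuristic
-- ===== SOURCE A (Python) =====
-- def L1(x_1,y_1,x_2,y_2):
--     return abs(x_1-x_2) + abs(y_1-y_2)
--
-- def card_and_closeness_heuristic(state,goal):
--     card = len(state)
--
--     # want to loop over all of the goast robots and compute the distance between all of them
--     states = list(state)
--     dist = 0
--     for i in range(len(states)):
--         for j in range(i+1,len(states)):
--             dist += L1(states[i][0],states[i][1],states[j][0],states[j][1])
--
--     return dist + card
-- ===== SOURCE B (Python) =====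
-- def card_and_closeness_heuristic(state, goal):
--     # Same value as the quadratic pairwise scan, computed per axis after sorting:
--     # sum_{i<j} |a_i - a_j| = sum_k (k*s_k - prefix_k) on the sorted values.
--     def axis(vals):
--         vals = sorted(vals)
--         total = 0
--         prefix = 0
--         k = 0
--         for v in vals:
--             total += k * v - prefix
--             prefix += v
--             k += 1
--         return total
--     return axis([p[0] for p in state]) + axis([p[1] for p in state]) + len(state)
-- ===== Notes on version B (the rewrite author's own statement) =====
-- stated objective: faster
-- what changed: Replaces the O(n^2) double loop over all pairs with per-axis sorting and a single prefix-sum pass, using sum_{i<j}|a_i-a_j| = sum_k (k*s_k - prefix_k) on each sorted coordinate list.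
import Mathlib
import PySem

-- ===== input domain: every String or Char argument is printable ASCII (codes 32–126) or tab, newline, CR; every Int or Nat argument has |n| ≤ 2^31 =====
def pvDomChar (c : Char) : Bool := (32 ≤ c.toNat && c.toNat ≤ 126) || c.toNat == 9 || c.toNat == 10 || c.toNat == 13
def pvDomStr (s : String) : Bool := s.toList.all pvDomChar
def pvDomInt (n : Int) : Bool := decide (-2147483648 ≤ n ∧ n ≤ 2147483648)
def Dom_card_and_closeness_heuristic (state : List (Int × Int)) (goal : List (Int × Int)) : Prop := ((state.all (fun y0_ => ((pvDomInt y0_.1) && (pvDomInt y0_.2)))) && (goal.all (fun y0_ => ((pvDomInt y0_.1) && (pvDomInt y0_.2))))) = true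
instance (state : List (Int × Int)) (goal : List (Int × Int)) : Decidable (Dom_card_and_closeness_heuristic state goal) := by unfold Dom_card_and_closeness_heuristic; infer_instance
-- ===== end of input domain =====

-- B replaces A's O(n^2) double loop over all point pairs by per-axis sorting plus one
-- prefix-sum pass (sum_{i<j}|a_i-a_j| computed in O(n log n)); the return value is identical.


-- ===== PORT A =====
-- L1(x1, y1, x2, y2) = abs(x1-x2) + abs(y1-y2)
def pvL1 (x1 y1 x2 y2 : Int) : Int := |x1 - x2| + |y1 - y2|

def card_and_closeness_heuristic (state : List (Int × Int)) (goal : List (Int × Int)) : Int :=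
  let card : Int := state.length
  let states : List (Int × Int) := state
  let dist : Int :=
    (PySem.List.pyRange 0 (states.length : Int) 1).foldl (fun dist i =>
      (PySem.List.pyRange (i + 1) (states.length : Int) 1).foldl (fun dist j =>
        dist + pvL1 (PySem.List.pyGetD states i (0, 0)).1 (PySem.List.pyGetD states i (0, 0)).2
                    (PySem.List.pyGetD states j (0, 0)).1 (PySem.List.pyGetD states j (0, 0)).2)
        dist) 0
  dist + card

-- ===== PORT B =====
-- axis(vals): sort, then one pass with running (total, prefix, k)
def pvAxis (vals : List Int) : Int :=
  let s := PySem.List.sorted vals (fun v => v) false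
  (s.foldl (fun (st : Int × Int × Int) v =>
      (st.1 + st.2.2 * v - st.2.1, st.2.1 + v, st.2.2 + 1)) (0, 0, 0)).1

def card_and_closeness_heuristic_alt (state : List (Int × Int)) (goal : List (Int × Int)) : Int :=
  pvAxis (state.map (fun p => p.1)) + pvAxis (state.map (fun p => p.2)) + state.length

-- ===== PRECONDITION & SPEC =====
def Spec_card_and_closeness_heuristic (state : List (Int × Int)) (goal : List (Int × Int)) (out : Int) : Prop := out = card_and_closeness_heuristic_alt state goal
instance (state : List (Int × Int)) (goal : List (Int × Int)) (out : Int) : Decidable (Spec_card_and_closeness_heuristic state goal out) := by unfold Spec_card_and_closeness_heuristic; infer_instance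

-- ===== CLAIM (what is proved, stated in full; the proofs are below) =====
def Claim_equal_card_and_closeness_heuristic : Prop := ∀ (state : List (Int × Int)) (goal : List (Int × Int)), Dom_card_and_closeness_heuristic state goal → Spec_card_and_closeness_heuristic state goal (card_and_closeness_heuristic state goal)

-- ===== LEMMAS AND PROOFS =====

-- sum over tails of pairwise absolute differences (one axis)
def pvP : List Int → Int
  | [] => 0
  | v :: r => (r.map (fun w => |v - w|)).sum + pvP r

-- sum over tails of pairwise L1 distances (both axes)
def pvQ : List (Int × Int) → Int
  | [] => 0
  | p :: r => (r.map (fun q => pvL1 p.1 p.2 q.1 q.2)).sum + pvQ r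

lemma pv_sum_map_add (r : List (Int × Int)) (f g : (Int × Int) → Int) :
    (r.map (fun q => f q + g q)).sum = (r.map f).sum + (r.map g).sum := by
  induction r with
  | nil => simp
  | cons q r ih => simp only [List.map_cons, List.sum_cons, ih]; ring

lemma pvQ_split (l : List (Int × Int)) :
    pvQ l = pvP (l.map (fun p => p.1)) + pvP (l.map (fun p => p.2)) := by
  induction l with
  | nil => simp [pvQ, pvP]
  | cons p r ih =>
    simp only [pvQ, pvP, List.map_cons, List.map_map, ih, pvL1]
    rw [pv_sum_map_add r (fun q => |p.1 - q.1|) (fun q => |p.2 - q.2|)]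
    simp only [Function.comp_def]
    ring

-- inner loop of A, started at index m, adds the L1 distances from v to states[m:]
lemma pv_inner (states : List (Int × Int)) (v : Int × Int) :
    ∀ k (m : Nat), states.length - m = k → ∀ acc : Int,
      (PySem.List.pyRange (m : Int) (states.length : Int) 1).foldl
        (fun d j => d + pvL1 v.1 v.2 (PySem.List.pyGetD states j (0, 0)).1
                        (PySem.List.pyGetD states j (0, 0)).2) acc
      = acc + ((states.drop m).map (fun q => pvL1 v.1 v.2 q.1 q.2)).sum := by
  intro k
  induction k with
  | zero =>
    intro m hm acc
    have hge : states.length ≤ m := by omega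
    rw [PySem.List.pyRange_one_eq_nil (by exact_mod_cast hge)]
    simp [List.drop_eq_nil_of_le hge]
  | succ k ih =>
    intro m hm acc
    have hlt : m < states.length := by omega
    rw [PySem.List.pyRange_one_cons (by exact_mod_cast hlt)]
    have hcast : ((m : Int) + 1) = ((m + 1 : Nat) : Int) := by push_cast; ring
    rw [List.foldl_cons, hcast, ih (m + 1) (by omega)]
    rw [List.drop_eq_getElem_cons hlt]
    simp [PySem.List.pyGetD_natCast, List.getD_eq_getElem?_getD, hlt]

-- outer loop of A, started at index m, adds the pairwise L1 sum of states[m:]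
lemma pv_outer (states : List (Int × Int)) :
    ∀ k (m : Nat), states.length - m = k → ∀ acc : Int,
      (PySem.List.pyRange (m : Int) (states.length : Int) 1).foldl (fun dist i =>
        (PySem.List.pyRange (i + 1) (states.length : Int) 1).foldl (fun dist j =>
          dist + pvL1 (PySem.List.pyGetD states i (0, 0)).1 (PySem.List.pyGetD states i (0, 0)).2
                      (PySem.List.pyGetD states j (0, 0)).1 (PySem.List.pyGetD states j (0, 0)).2)
          dist) acc
      = acc + pvQ (states.drop m) := by
  intro k
  induction k with
  | zero =>
    intro m hm acc
    have hge : states.length ≤ m := by omega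
    rw [PySem.List.pyRange_one_eq_nil (by exact_mod_cast hge)]
    simp [List.drop_eq_nil_of_le hge, pvQ]
  | succ k ih =>
    intro m hm acc
    have hlt : m < states.length := by omega
    rw [PySem.List.pyRange_one_cons (by exact_mod_cast hlt)]
    have hcast : ((m : Int) + 1) = ((m + 1 : Nat) : Int) := by push_cast; ring
    rw [List.foldl_cons, hcast,
        pv_inner states (PySem.List.pyGetD states (m : Int) (0, 0)) (states.length - (m + 1))
          (m + 1) rfl acc,
        ih (m + 1) (by omega)]
    rw [List.drop_eq_getElem_cons hlt]
    simp only [pvQ]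
    simp [PySem.List.pyGetD_natCast, List.getD_eq_getElem?_getD, hlt]
    ring

lemma pvA_eq (state goal : List (Int × Int)) :
    card_and_closeness_heuristic state goal = pvQ state + state.length := by
  unfold card_and_closeness_heuristic
  have h0 : ((0 : Nat) : Int) = (0 : Int) := rfl
  have := pv_outer state state.length 0 (by omega) 0
  rw [h0] at this
  simp only [this, List.drop_zero]
  ring

-- pvP is invariant under permutation
lemma pvP_perm {l₁ l₂ : List Int} (h : l₁.Perm l₂) : pvP l₁ = pvP l₂ := by
  induction h with
  | nil => rfl
  | cons x h ih => simp only [pvP, ih, (h.map _).sum_eq]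
  | swap a b l =>
    simp only [pvP, List.map_cons, List.sum_cons]
    rw [abs_sub_comm b a]
    ring
  | trans _ _ ih1 ih2 => rw [ih1, ih2]

lemma pv_sum_abs (v : Int) (r : List Int) (h : ∀ w ∈ r, v ≤ w) :
    (r.map (fun w => |v - w|)).sum = r.sum - (r.length : Int) * v := by
  induction r with
  | nil => simp
  | cons w r ih =>
    have hv : v ≤ w := h w (by simp)
    have : |v - w| = w - v := by rw [abs_sub_comm]; exact abs_of_nonneg (by omega)
    simp [this, ih (fun w hw => h w (by simp [hw]))]
    ring_nf

-- the single pass of B on a sorted list computes pvP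
lemma pv_axis_loop (s : List Int) (hp : s.Pairwise (· ≤ ·)) :
    ∀ a p k : Int,
      (s.foldl (fun (st : Int × Int × Int) v =>
          (st.1 + st.2.2 * v - st.2.1, st.2.1 + v, st.2.2 + 1)) (a, p, k)).1
      = a + pvP s + k * s.sum - (s.length : Int) * p := by
  induction s with
  | nil => intro a p k; simp [pvP]
  | cons v r ih =>
    rcases List.pairwise_cons.mp hp with ⟨hv, hr⟩
    intro a p k
    simp only [List.foldl_cons, ih hr, pvP, List.sum_cons, List.length_cons,
      pv_sum_abs v r hv]
    push_cast
    ring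

lemma pvAxis_eq (vals : List Int) : pvAxis vals = pvP vals := by
  unfold pvAxis
  have hp : (PySem.List.sorted vals (fun v => v) false).Pairwise (· ≤ ·) :=
    PySem.List.sorted_pairwise vals (fun v => v)
  rw [pv_axis_loop _ hp 0 0 0,
      pvP_perm (PySem.List.sorted_perm vals (fun v => v) false)]
  ring

-- ===== VERDICT (by name: the statement is the Claim_ definition above) =====
theorem card_and_closeness_heuristic_spec : Claim_equal_card_and_closeness_heuristic := by
  intro state goal _
  unfold Spec_card_and_closeness_heuristic card_and_closeness_heuristic_alt
  rw [pvA_eq, pvAxis_eq, pvAxis_eq, pvQ_split]
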